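-- pv_equiv track=rewrite | github.com/DomPulse/im_making_a_computer | this_episode_is_brought_to_you_by_the_letter_A.py | generate_arduino_array
-- ===== SOURCE A (Python) =====
-- def generate_arduino_array(m, n, i, j, k, l):
--     # Create an m x n matrix filled with zeros initially
--     array = [[0 for _ in range(n)] for _ in range(m)]
--
--     # Calculate the area where the letter 'A' will be drawn
--     for row in range(k, m - l):
--         for col in range(i, n - j):
--             # Draw 'A' pattern
--             if (row == k or row == m - l - 1):  # Top and bottom horizontal lines
--                 array[row][col] = 1
--             elif (row - k == col - i) or (row - k == n - j - col - 1):  # Diagonal lines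
--                 array[row][col] = 1
--
--     # Format the array as a string to be printed in Arduino syntax
--     formatted_array = '{'
--     for row in array:
--         formatted_array += '{' + ', '.join(map(str, row)) + '},\n'
--     formatted_array = formatted_array.rstrip(',\n') + '}'
--
--     return formatted_array
-- ===== SOURCE B (Python) =====
-- def generate_arduino_array(m, n, i, j, k, l):
--     # Build the zero grid, then place the 1s directly instead of testing every cell.
--     array = [[0] * n for _ in range(m)]
--     if k < m - l and i < n - j:
--         # Top and bottom horizontal bars: whole column span.
--         for col in range(i, n - j):
--             array[k][col] = 1
--             array[m - l - 1][col] = 1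
--         # Two diagonal cells per interior row, each only if inside the span.
--         for row in range(k + 1, m - l - 1):
--             d = row - k
--             for col in (i + d, n - j - 1 - d):
--                 if i <= col < n - j:
--                     array[row][col] = 1
--     return '{' + ',\n'.join('{' + ', '.join(map(str, row)) + '}' for row in array) + '}'
-- ===== Notes on version B (the rewrite author's own statement) =====
-- stated objective: alternative
-- what changed: Instead of scanning every cell of the drawing region and testing it against the 'A' pattern, B writes the 1s directly (the full column span for the two border rows, and the two diagonal cells per interior row, each guarded to the span), and formats with a single ', '.join instead of append-then-rstrip.
import Mathlib
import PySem

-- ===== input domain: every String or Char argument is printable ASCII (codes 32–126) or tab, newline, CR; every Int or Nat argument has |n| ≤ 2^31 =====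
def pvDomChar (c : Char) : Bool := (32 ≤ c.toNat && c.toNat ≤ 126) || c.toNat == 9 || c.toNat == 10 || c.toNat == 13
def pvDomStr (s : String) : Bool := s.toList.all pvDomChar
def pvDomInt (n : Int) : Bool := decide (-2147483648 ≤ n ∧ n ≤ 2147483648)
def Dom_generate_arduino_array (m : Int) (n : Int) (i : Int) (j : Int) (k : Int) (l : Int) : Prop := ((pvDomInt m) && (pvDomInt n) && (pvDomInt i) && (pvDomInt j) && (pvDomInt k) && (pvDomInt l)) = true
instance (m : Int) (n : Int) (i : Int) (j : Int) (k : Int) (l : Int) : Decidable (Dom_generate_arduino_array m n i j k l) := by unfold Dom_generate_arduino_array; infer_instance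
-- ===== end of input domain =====

-- B places the letter's 1-cells directly (two border bars + two diagonal cells per interior
-- row) instead of testing every cell of the drawing region, and joins the rows; same output.

-- Shared helper of both ports: the Python statement `array[row][col] = 1`
-- (both A and B perform exactly this statement; negative indices wrap, as in Python).
def pvWrite (g : List (List Int)) (row col : Int) : List (List Int) :=
  PySem.List.pySetD g row (PySem.List.pySetD (PySem.List.pyGetD g row []) col 1)

-- Shared helper of both ports: `', '.join(map(str, row))` (both Pythons contain this code).
def pvRowChars (row : List Int) : List Char :=
  PySem.Chars.join [',', ' '] (row.map PySem.Int.toChars)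

-- Hand port of Python's `s.rstrip(chars)` (PySem has no chars-argument rstrip):
-- drop from the right end every character contained in `chars` — exact.
def pvRstrip (cs chars : List Char) : List Char :=
  (cs.reverse.dropWhile (fun c => chars.contains c)).reverse

-- ===== PORT A =====
def generate_arduino_array (m : Int) (n : Int) (i : Int) (j : Int) (k : Int) (l : Int) : String :=
  let array0 := (PySem.List.pyRange 0 m 1).map (fun _ => (PySem.List.pyRange 0 n 1).map (fun _ => (0 : Int)))
  let array := (PySem.List.pyRange k (m - l) 1).foldl (fun arr row =>
      (PySem.List.pyRange i (n - j) 1).foldl (fun arr col =>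
        if row = k ∨ row = m - l - 1 then pvWrite arr row col
        else if row - k = col - i ∨ row - k = n - j - col - 1 then pvWrite arr row col
        else arr) arr) array0
  let formatted := array.foldl (fun acc row => acc ++ ('{' :: pvRowChars row) ++ ['}', ',', '\n']) ['{']
  String.mk (pvRstrip formatted [',', '\n'] ++ ['}'])

-- ===== PORT B =====
def generate_arduino_array_alt (m : Int) (n : Int) (i : Int) (j : Int) (k : Int) (l : Int) : String :=
  -- `[0] * n` is exactly List.replicate n.toNat 0 (empty for n ≤ 0)
  let array0 := (PySem.List.pyRange 0 m 1).map (fun _ => List.replicate n.toNat (0 : Int))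
  let array :=
    if k < m - l ∧ i < n - j then
      let g1 := (PySem.List.pyRange i (n - j) 1).foldl (fun arr col =>
        pvWrite (pvWrite arr k col) (m - l - 1) col) array0
      (PySem.List.pyRange (k + 1) (m - l - 1) 1).foldl (fun arr row =>
        [i + (row - k), n - j - 1 - (row - k)].foldl (fun arr col =>
          if i ≤ col ∧ col < n - j then pvWrite arr row col else arr) arr) g1
    else array0
  String.mk ('{' :: PySem.Chars.join [',', '\n'] (array.map (fun row => '{' :: pvRowChars row ++ ['}'])) ++ ['}'])

-- ===== PRECONDITION & SPEC =====
-- Exactly the inputs on which the Python A returns: either the drawing region is empty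
-- (no write happens) or every written row/column index lies in Python's valid index range
-- [-m, m) / [-n, n); on every other input A raises IndexError on its first write.
def Pre_generate_arduino_array (m : Int) (n : Int) (i : Int) (j : Int) (k : Int) (l : Int) : Prop :=
  m - l ≤ k ∨ n - j ≤ i ∨ (-m ≤ k ∧ m - l ≤ m ∧ -n ≤ i ∧ n - j ≤ n)
instance (m : Int) (n : Int) (i : Int) (j : Int) (k : Int) (l : Int) : Decidable (Pre_generate_arduino_array m n i j k l) := by unfold Pre_generate_arduino_array; infer_instance
def pvWitness_generate_arduino_array : Int × Int × Int × Int × Int × Int := (7, 7, 1, 1, 1, 1)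

def Spec_generate_arduino_array (m : Int) (n : Int) (i : Int) (j : Int) (k : Int) (l : Int) (out : String) : Prop := out = generate_arduino_array_alt m n i j k l
instance (m : Int) (n : Int) (i : Int) (j : Int) (k : Int) (l : Int) (out : String) : Decidable (Spec_generate_arduino_array m n i j k l out) := by unfold Spec_generate_arduino_array; infer_instance

-- ===== CLAIM (what is proved, stated in full; the proofs are below) =====
def Claim_equal_generate_arduino_array : Prop := ∀ (m : Int) (n : Int) (i : Int) (j : Int) (k : Int) (l : Int), Dom_generate_arduino_array m n i j k l → Pre_generate_arduino_array m n i j k l → Spec_generate_arduino_array m n i j k l (generate_arduino_array m n i j k l)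

-- ===== LEMMAS AND PROOFS =====

/-- Shape of a grid: `M` rows, every row of length `N`. -/
def pvShape (g : List (List Int)) (M N : Nat) : Prop :=
  g.length = M ∧ ∀ row ∈ g, row.length = N

/-- Cell read with defaults (equals the real entry inside the shape). -/
def pvCell (g : List (List Int)) (r c : Nat) : Int :=
  (g.getD r []).getD c 0

theorem pvIdx_lt {M : Nat} {x : Int} {r : Nat} (h : PySem.List.pyIdx? M x = some r) : r < M := by
  unfold PySem.List.pyIdx? at h
  split_ifs at h with h1 h2 h3 <;> simp_all <;> omega

theorem pvIdx_isSome {M : Nat} {x : Int} (h1 : -(M : Int) ≤ x) (h2 : x < M) :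
    (PySem.List.pyIdx? M x).isSome := by
  unfold PySem.List.pyIdx?
  split_ifs <;> simp_all

theorem pvWrite_skip {g : List (List Int)} {row : Int} (col : Int)
    (h : PySem.List.pyIdx? g.length row = none) : pvWrite g row col = g := by
  unfold pvWrite PySem.List.pySetD PySem.List.pySet?
  rw [h]; rfl

theorem pvWrite_eq {g : List (List Int)} {row : Int} {ρ : Nat} (col : Int)
    (h : PySem.List.pyIdx? g.length row = some ρ) :
    pvWrite g row col =
      g.set ρ (PySem.List.pySetD (g.getD ρ []) col 1) := by
  have hρ : ρ < g.length := pvIdx_lt h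
  have hget : PySem.List.pyGetD g row [] = g.getD ρ [] := by
    unfold PySem.List.pyGetD PySem.List.pyGet?
    rw [h, List.getD_eq_getElem?_getD]
    rfl
  unfold pvWrite PySem.List.pySetD PySem.List.pySet?
  rw [h, hget]
  rfl

theorem pvShape_write {g : List (List Int)} {M N : Nat} (row col : Int)
    (h : pvShape g M N) : pvShape (pvWrite g row col) M N := by
  obtain ⟨hl, hr⟩ := h
  cases hidx : PySem.List.pyIdx? g.length row with
  | none => rw [pvWrite_skip col hidx]; exact ⟨hl, hr⟩
  | some ρ =>
    rw [pvWrite_eq col hidx]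
    constructor
    · simpa using hl
    · intro q hq
      rcases List.mem_or_eq_of_mem_set hq with h1 | h1
      · exact hr q h1
      · subst h1
        rw [PySem.List.length_pySetD]
        have hρ : ρ < g.length := pvIdx_lt hidx
        have : g.getD ρ [] ∈ g := by
          rw [List.getD_eq_getElem?_getD, List.getElem?_eq_getElem hρ]
          exact List.getElem_mem hρ
        exact hr _ this

theorem pvSetD_getD {xs : List Int} {col : Int} {σ : Nat}
    (h : PySem.List.pyIdx? xs.length col = some σ) (c : Nat) :
    (PySem.List.pySetD xs col 1).getD c 0 = if σ = c then 1 else xs.getD c 0 := by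
  have hσ : σ < xs.length := pvIdx_lt h
  unfold PySem.List.pySetD PySem.List.pySet?
  rw [h]
  simp only [Option.map_some, Option.getD_some]
  rw [List.getD_eq_getElem?_getD, List.getElem?_set]
  split_ifs with h1 h2 <;> simp_all [List.getD_eq_getElem?_getD]

/-- Effect of one `array[row][col] = 1` on a cell. -/
theorem pvCell_write {g : List (List Int)} {M N : Nat} {row col : Int}
    (h : pvShape g M N)
    (hrow : -(M : Int) ≤ row ∧ row < M) (hcol : -(N : Int) ≤ col ∧ col < N)
    (r c : Nat) :
    pvCell (pvWrite g row col) r c =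
      if PySem.List.pyIdx? M row = some r ∧ PySem.List.pyIdx? N col = some c then 1
      else pvCell g r c := by
  obtain ⟨hl, hrows⟩ := h
  obtain ⟨ρ, hρ⟩ := Option.isSome_iff_exists.mp (pvIdx_isSome hrow.1 hrow.2)
  have hidx : PySem.List.pyIdx? g.length row = some ρ := by rw [hl]; exact hρ
  have hρM : ρ < M := pvIdx_lt hρ
  have hrowmem : g.getD ρ [] ∈ g := by
    rw [List.getD_eq_getElem?_getD, List.getElem?_eq_getElem (hl ▸ hρM)]
    exact List.getElem_mem _
  have hrowlen : (g.getD ρ []).length = N := hrows _ hrowmem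
  obtain ⟨σ, hσ⟩ := Option.isSome_iff_exists.mp (pvIdx_isSome hcol.1 hcol.2)
  have hσ' : PySem.List.pyIdx? (g.getD ρ []).length col = some σ := by rw [hrowlen]; exact hσ
  rw [pvWrite_eq col hidx]
  unfold pvCell
  rw [List.getD_eq_getElem?_getD (l := g.set ρ _), List.getElem?_set]
  rw [hρ, hσ]
  by_cases h1 : ρ = r
  · subst h1
    simp only [if_pos rfl, hl ▸ hρM, if_pos]
    rw [Option.getD_some, pvSetD_getD hσ' c]
    split_ifs with h2 h3 h3 <;> simp_all [List.getD_eq_getElem?_getD]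
  · simp only [if_neg h1]
    have : ¬ (some ρ = some r ∧ some σ = some c) := by
      intro ⟨ha, _⟩; exact h1 (Option.some.inj ha)
    rw [if_neg this]
    simp [List.getD_eq_getElem?_getD]

/-- Effect of a loop of guarded writes on every cell. -/
theorem pvFold_cell (ps : List (Int × Int)) (C : Int × Int → Prop) [DecidablePred C]
    {M N : Nat} (g : List (List Int)) (h : pvShape g M N)
    (hps : ∀ p ∈ ps, C p → -(M : Int) ≤ p.1 ∧ p.1 < M ∧ -(N : Int) ≤ p.2 ∧ p.2 < N) :
    pvShape (ps.foldl (fun g p => if C p then pvWrite g p.1 p.2 else g) g) M N ∧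
    ∀ r c : Nat,
      pvCell (ps.foldl (fun g p => if C p then pvWrite g p.1 p.2 else g) g) r c =
        if ∃ p ∈ ps, C p ∧ PySem.List.pyIdx? M p.1 = some r ∧ PySem.List.pyIdx? N p.2 = some c
        then 1 else pvCell g r c := by
  induction ps generalizing g with
  | nil => exact ⟨h, by simp⟩
  | cons p ps ih =>
    by_cases hc : C p
    · have hrange := hps p (by simp) hc
      have hsh : pvShape (pvWrite g p.1 p.2) M N := pvShape_write p.1 p.2 h
      have ihh := ih (pvWrite g p.1 p.2) hsh (fun q hq => hps q (by simp [hq]))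
      refine ⟨by simpa [List.foldl_cons, if_pos hc] using ihh.1, ?_⟩
      intro r c
      simp only [List.foldl_cons, if_pos hc]
      rw [ihh.2 r c, pvCell_write h ⟨hrange.1, hrange.2.1⟩ ⟨hrange.2.2.1, hrange.2.2.2⟩ r c]
      by_cases h1 : ∃ q ∈ ps, C q ∧ PySem.List.pyIdx? M q.1 = some r ∧ PySem.List.pyIdx? N q.2 = some c
      · rw [if_pos h1, if_pos]
        obtain ⟨q, hq, hrest⟩ := h1
        exact ⟨q, by simp [hq], hrest⟩
      · rw [if_neg h1]
        by_cases h2 : PySem.List.pyIdx? M p.1 = some r ∧ PySem.List.pyIdx? N p.2 = some c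
        · rw [if_pos h2, if_pos ⟨p, by simp, hc, h2⟩]
        · rw [if_neg h2, if_neg]
          rintro ⟨q, hq, hCq, hrest⟩
          rcases List.mem_cons.mp hq with rfl | hq'
          · exact h2 hrest
          · exact h1 ⟨q, hq', hCq, hrest⟩
    · have ihh := ih g h (fun q hq => hps q (by simp [hq]))
      refine ⟨by simpa [List.foldl_cons, if_neg hc] using ihh.1, ?_⟩
      intro r c
      simp only [List.foldl_cons, if_neg hc]
      rw [ihh.2 r c]
      congr 1
      simp only [List.mem_cons, eq_iff_iff]
      constructor
      · rintro ⟨q, hq, hrest⟩; exact ⟨q, by simp [hq], hrest⟩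
      · rintro ⟨q, rfl | hq, hCq, hrest⟩
        · exact absurd hCq hc
        · exact ⟨q, hq, hCq, hrest⟩

/-- A nested loop over rows and (row-dependent) columns is a loop over the pair list. -/
theorem pvFoldNested {γ : Type} (rows : List Int) (cols : Int → List Int)
    (f : γ → Int → Int → γ) (g : γ) :
    rows.foldl (fun g r => (cols r).foldl (fun g c => f g r c) g) g
      = (rows.flatMap (fun r => (cols r).map (fun c => (r, c)))).foldl
          (fun g p => f g p.1 p.2) g := by
  induction rows generalizing g with
  | nil => rfl
  | cons r rows ih =>
    simp only [List.foldl_cons, List.flatMap_cons, List.foldl_append, List.foldl_map]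
    exact ih _

/-- B's bar loop (two unconditional writes per column) as a loop over the pair list. -/
theorem pvFoldTwo {γ : Type} (cols : List Int) (a b : Int)
    (f : γ → Int → Int → γ) (g : γ) :
    cols.foldl (fun g c => f (f g a c) b c) g
      = (cols.flatMap (fun c => [(a, c), (b, c)])).foldl (fun g p => f g p.1 p.2) g := by
  induction cols generalizing g with
  | nil => rfl
  | cons c cols ih =>
    simp only [List.foldl_cons, List.flatMap_cons, List.foldl_append, List.foldl_cons]
    exact ih _

theorem pvZeroRow (n : Int) :
    (PySem.List.pyRange 0 n 1).map (fun _ => (0 : Int)) = List.replicate n.toNat 0 := by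
  rw [List.map_const', PySem.List.length_pyRange_one]
  norm_num

theorem pvShape_g0 (m n : Int) :
    pvShape ((PySem.List.pyRange 0 m 1).map (fun _ => List.replicate n.toNat (0 : Int)))
      m.toNat n.toNat := by
  constructor
  · rw [List.length_map, PySem.List.length_pyRange_one]; norm_num
  · intro row hrow
    obtain ⟨_, _, rfl⟩ := List.mem_map.mp hrow
    simp

theorem pvCell_g0 (m n : Int) (r c : Nat) :
    pvCell ((PySem.List.pyRange 0 m 1).map (fun _ => List.replicate n.toNat (0 : Int))) r c = 0 := by
  unfold pvCell
  set g := (PySem.List.pyRange 0 m 1).map (fun _ => List.replicate n.toNat (0 : Int)) with hg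
  by_cases hr : r < g.length
  · have hmem : g.getD r [] ∈ g := by
      rw [List.getD_eq_getElem?_getD, List.getElem?_eq_getElem hr]
      exact List.getElem_mem hr
    obtain ⟨_, _, hrow⟩ := List.mem_map.mp hmem
    rw [← hrow]
    rw [List.getD_eq_getElem?_getD, List.getElem?_replicate]
    split_ifs <;> rfl
  · rw [List.getD_eq_default _ _ (Nat.le_of_not_lt hr)]
    rfl

/-- Two same-shape grids with equal cells are equal. -/
theorem pvGridExt {g h : List (List Int)} {M N : Nat}
    (hg : pvShape g M N) (hh : pvShape h M N)
    (hc : ∀ r c : Nat, r < M → c < N → pvCell g r c = pvCell h r c) : g = h := by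
  obtain ⟨hgl, hgr⟩ := hg
  obtain ⟨hhl, hhr⟩ := hh
  apply List.ext_getElem (by omega)
  intro r h1 h2
  apply List.ext_getElem
  · rw [hgr _ (List.getElem_mem h1), hhr _ (List.getElem_mem h2)]
  intro c hc1 hc2
  have hrN : r < M := by omega
  have hcN : c < N := by rw [hgr _ (List.getElem_mem h1)] at hc1; exact hc1
  have := hc r c hrN hcN
  unfold pvCell at this
  simp only [List.getD_eq_getElem?_getD] at this
  rw [List.getElem?_eq_getElem h1, List.getElem?_eq_getElem h2] at this
  simp only [Option.getD_some] at this
  rw [List.getElem?_eq_getElem hc1, List.getElem?_eq_getElem hc2] at this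
  simpa using this

-- ---------- formatting ----------

theorem pvFoldlAppend {α : Type} (xs : List α) (f : α → List Char) (a : List Char) :
    xs.foldl (fun acc x => acc ++ f x) a = a ++ (xs.map f).flatten := by
  induction xs generalizing a with
  | nil => simp
  | cons x xs ih => simp [List.foldl_cons, ih, List.append_assoc]

theorem pvFlattenJoin (sep : List Char) (pieces : List (List Char)) (h : pieces ≠ []) :
    (pieces.map (· ++ sep)).flatten = PySem.Chars.join sep pieces ++ sep := by
  induction pieces with
  | nil => exact absurd rfl h
  | cons p ps ih =>
    cases ps with
    | nil => simp [PySem.Chars.join_singleton]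
    | cons q rest =>
      rw [PySem.Chars.join_cons_cons]
      simp only [List.map_cons, List.flatten_cons] at *
      rw [ih (by simp)]
      simp [List.append_assoc]

theorem pvJoinLast (sep : List Char) (pieces : List (List Char)) (h : pieces ≠ [])
    (hlast : ∀ p ∈ pieces, p.getLast? = some '}') :
    (PySem.Chars.join sep pieces).getLast? = some '}' := by
  induction pieces with
  | nil => exact absurd rfl h
  | cons p ps ih =>
    cases ps with
    | nil => rw [PySem.Chars.join_singleton]; exact hlast p (by simp)
    | cons q rest =>
      rw [PySem.Chars.join_cons_cons, List.getLast?_append,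
        ih (by simp) (fun x hx => hlast x (by simp [hx]))]
      rfl

theorem pvRstrip_append_all (s t chars : List Char) (h : ∀ c ∈ t, chars.contains c = true) :
    pvRstrip (s ++ t) chars = pvRstrip s chars := by
  unfold pvRstrip
  rw [List.reverse_append, List.dropWhile_append]
  have : t.reverse.dropWhile (fun c => chars.contains c) = [] :=
    List.dropWhile_eq_nil_iff.mpr (fun x hx => h x (List.mem_reverse.mp hx))
  rw [this]
  simp

theorem pvRstrip_eq_self (s chars : List Char) {d : Char} (h : s.getLast? = some d)
    (hd : chars.contains d = false) : pvRstrip s chars = s := by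
  obtain ⟨s', rfl⟩ := List.getLast?_eq_some_iff.mp h
  unfold pvRstrip
  rw [List.reverse_append]
  simp only [List.reverse_cons, List.reverse_nil, List.nil_append, List.cons_append,
    List.dropWhile_cons]
  rw [hd]
  simp

/-- A's append-then-rstrip formatting equals B's join formatting, on any grid. -/
theorem pvFmt (rows : List (List Int)) :
    String.mk (pvRstrip (rows.foldl
        (fun acc row => acc ++ ('{' :: pvRowChars row) ++ ['}', ',', '\n']) ['{']) [',', '\n'] ++ ['}'])
      = String.mk ('{' :: PySem.Chars.join [',', '\n']
          (rows.map (fun row => '{' :: pvRowChars row ++ ['}'])) ++ ['}']) := by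
  have hstep : ∀ (acc : List Char) (row : List Int),
      acc ++ ('{' :: pvRowChars row) ++ ['}', ',', '\n']
        = acc ++ (('{' :: pvRowChars row ++ ['}']) ++ [',', '\n']) := by
    intro acc row; simp [List.append_assoc]
  simp only [hstep]
  rw [pvFoldlAppend rows (fun row => ('{' :: pvRowChars row ++ ['}']) ++ [',', '\n']) ['{']]
  cases hrows : rows with
  | nil => simp [pvRstrip, PySem.Chars.join_nil]
  | cons r rs =>
    set pieces := (r :: rs).map (fun row => '{' :: pvRowChars row ++ ['}']) with hp
    have hne : pieces ≠ [] := by simp [hp]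
    have hlast : ∀ p ∈ pieces, p.getLast? = some '}' := by
      intro p hpmem
      obtain ⟨row, _, rfl⟩ := List.mem_map.mp hpmem
      rw [show '{' :: pvRowChars row ++ ['}'] = ('{' :: pvRowChars row) ++ ['}'] by simp,
        List.getLast?_append]
      rfl
    have hmap : (r :: rs).map (fun row => ('{' :: pvRowChars row ++ ['}']) ++ [',', '\n'])
        = pieces.map (· ++ [',', '\n']) := by
      rw [hp, List.map_map]; rfl
    rw [hmap, pvFlattenJoin _ _ hne]
    have hjl : (PySem.Chars.join [',', '\n'] pieces).getLast? = some '}' :=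
      pvJoinLast _ _ hne hlast
    have hassoc : (['{'] ++ (PySem.Chars.join [',', '\n'] pieces ++ [',', '\n']) : List Char)
        = ('{' :: PySem.Chars.join [',', '\n'] pieces) ++ [',', '\n'] := by simp
    rw [hassoc, pvRstrip_append_all _ _ _ (by
      intro c hcm; rcases List.mem_cons.mp hcm with rfl | hcm' <;> simp_all)]
    have hlastc : ('{' :: PySem.Chars.join [',', '\n'] pieces : List Char).getLast? = some '}' := by
      rw [show ('{' :: PySem.Chars.join [',', '\n'] pieces : List Char)
          = ['{'] ++ PySem.Chars.join [',', '\n'] pieces by simp, List.getLast?_append, hjl]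
      rfl
    rw [pvRstrip_eq_self _ _ hlastc (by simp)]

theorem pvFoldlId {gamma : Type} (xs : List Int) (g : gamma) :
    xs.foldl (fun g _ => g) g = g := by
  induction xs generalizing g <;> simp_all

/-- `pvFold_cell` for unconditional writes. -/
theorem pvFold_cell_true (ps : List (Int × Int)) {M N : Nat} (g : List (List Int))
    (h : pvShape g M N)
    (hps : ∀ p ∈ ps, -(M : Int) ≤ p.1 ∧ p.1 < M ∧ -(N : Int) ≤ p.2 ∧ p.2 < N) :
    pvShape (ps.foldl (fun g p => pvWrite g p.1 p.2) g) M N ∧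
    ∀ r c : Nat,
      pvCell (ps.foldl (fun g p => pvWrite g p.1 p.2) g) r c =
        if ∃ p ∈ ps, PySem.List.pyIdx? M p.1 = some r ∧ PySem.List.pyIdx? N p.2 = some c
        then 1 else pvCell g r c := by
  have hfun : (fun (g : List (List Int)) (p : Int × Int) =>
      if (fun _ => True) p then pvWrite g p.1 p.2 else g) = fun g p => pvWrite g p.1 p.2 := by
    funext g p; simp
  have := pvFold_cell ps (fun _ => True) g h (fun p hp _ => hps p hp)
  rw [hfun] at this
  refine ⟨this.1, fun r c => ?_⟩
  rw [this.2 r c]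
  congr 1
  simp

-- ===== VERDICT (by name: the statement is the Claim_ definition above) =====
set_option maxHeartbeats 2000000 in
theorem generate_arduino_array_spec : Claim_equal_generate_arduino_array := by
  intro m n i j k l _ hpre
  unfold Spec_generate_arduino_array generate_arduino_array generate_arduino_array_alt
  simp only []
  set g0 : List (List Int) :=
    (PySem.List.pyRange 0 m 1).map (fun _ => List.replicate n.toNat (0 : Int)) with hg0def
  have hg0 : (PySem.List.pyRange 0 m 1).map
      (fun _ => (PySem.List.pyRange 0 n 1).map (fun _ => (0 : Int))) = g0 := by
    rw [hg0def]; simp only [pvZeroRow]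
  rw [hg0]
  by_cases hk : k < m - l
  · by_cases hi : i < n - j
    · -- main case: nonempty drawing region, all indices in wrap range
      have hb : -m ≤ k ∧ m - l ≤ m ∧ -n ≤ i ∧ n - j ≤ n := by
        rcases hpre with h | h | h
        · omega
        · omega
        · exact h
      have hm : 0 < m := by omega
      have hn : 0 < n := by omega
      set M := m.toNat with hMdef
      set N := n.toNat with hNdef
      have hMm : (M : Int) = m := Int.toNat_of_nonneg (by omega)
      have hNn : (N : Int) = n := Int.toNat_of_nonneg (by omega)
      have hsh0 : pvShape g0 M N := pvShape_g0 m n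
      -- A's grid as one loop of guarded writes over the pair list
      have hstepA : ∀ (arr : List (List Int)) (row col : Int),
          (if row = k ∨ row = m - l - 1 then pvWrite arr row col
           else if row - k = col - i ∨ row - k = n - j - col - 1 then pvWrite arr row col
           else arr)
          = if (row = k ∨ row = m - l - 1) ∨
              (row - k = col - i ∨ row - k = n - j - col - 1) then pvWrite arr row col
            else arr := by
        intro arr row col
        split_ifs <;> first | rfl | tauto
      simp only [hstepA]
      rw [pvFoldNested (PySem.List.pyRange k (m - l) 1) (fun _ => PySem.List.pyRange i (n - j) 1)
        (fun g r c => if (r = k ∨ r = m - l - 1) ∨ (r - k = c - i ∨ r - k = n - j - c - 1)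
          then pvWrite g r c else g) g0]
      set psA := (PySem.List.pyRange k (m - l) 1).flatMap
        (fun r => (PySem.List.pyRange i (n - j) 1).map (fun c => (r, c))) with hpsA
      have hmemA : ∀ p ∈ psA, k ≤ p.1 ∧ p.1 < m - l ∧ i ≤ p.2 ∧ p.2 < n - j := by
        intro p hp
        rw [hpsA] at hp
        simp only [List.mem_flatMap, List.mem_map, PySem.List.mem_pyRange_one] at hp
        obtain ⟨a, ha, b, hbmem, rfl⟩ := hp
        exact ⟨ha.1, ha.2, hbmem.1, hbmem.2⟩
      have hAcell := pvFold_cell psA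
        (fun p => (p.1 = k ∨ p.1 = m - l - 1) ∨ (p.1 - k = p.2 - i ∨ p.1 - k = n - j - p.2 - 1))
        g0 hsh0 (by intro p hp _; have := hmemA p hp; omega)
      -- B's grid: bars, then diagonals
      rw [if_pos ⟨hk, hi⟩]
      rw [pvFoldTwo (PySem.List.pyRange i (n - j) 1) k (m - l - 1) pvWrite g0]
      set psB1 := (PySem.List.pyRange i (n - j) 1).flatMap
        (fun c => [(k, c), (m - l - 1, c)]) with hpsB1
      have hmemB1 : ∀ p ∈ psB1, (p.1 = k ∨ p.1 = m - l - 1) ∧ i ≤ p.2 ∧ p.2 < n - j := by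
        intro p hp
        rw [hpsB1] at hp
        simp only [List.mem_flatMap, PySem.List.mem_pyRange_one, List.mem_cons,
          List.mem_singleton] at hp
        obtain ⟨c, hc, rfl | rfl | h⟩ := hp
        · exact ⟨Or.inl rfl, hc⟩
        · exact ⟨Or.inr rfl, hc⟩
        · exact absurd h (by simp)
      have hB1 := pvFold_cell_true psB1 g0 hsh0
        (by intro p hp; have := hmemB1 p hp; rcases this.1 with h1 | h1 <;> omega)
      rw [pvFoldNested (PySem.List.pyRange (k + 1) (m - l - 1) 1)
        (fun r => [i + (r - k), n - j - 1 - (r - k)])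
        (fun g r c => if i ≤ c ∧ c < n - j then pvWrite g r c else g) _]
      set psB2 := (PySem.List.pyRange (k + 1) (m - l - 1) 1).flatMap
        (fun r => [i + (r - k), n - j - 1 - (r - k)].map (fun c => (r, c))) with hpsB2
      have hmemB2 : ∀ p ∈ psB2, (k + 1 ≤ p.1 ∧ p.1 < m - l - 1) ∧
          (p.2 = i + (p.1 - k) ∨ p.2 = n - j - 1 - (p.1 - k)) := by
        intro p hp
        rw [hpsB2] at hp
        simp only [List.mem_flatMap, List.mem_map, PySem.List.mem_pyRange_one, List.mem_cons,
          List.mem_singleton] at hp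
        obtain ⟨a, ha, b, hb, rfl⟩ := hp
        rcases hb with rfl | rfl | h
        · exact ⟨ha, Or.inl rfl⟩
        · exact ⟨ha, Or.inr rfl⟩
        · exact absurd h (by simp)
      have hB2 := pvFold_cell psB2 (fun p => i ≤ p.2 ∧ p.2 < n - j)
        _ hB1.1 (by intro p hp hC; have := hmemB2 p hp; omega)
      -- the two grids are equal
      have hgrid := pvGridExt hAcell.1 hB2.1 (by
        intro r c hr hc
        rw [hAcell.2 r c, hB2.2 r c, hB1.2 r c, pvCell_g0]
        have key : (∃ p ∈ psA,
            ((p.1 = k ∨ p.1 = m - l - 1) ∨ (p.1 - k = p.2 - i ∨ p.1 - k = n - j - p.2 - 1)) ∧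
            PySem.List.pyIdx? M p.1 = some r ∧ PySem.List.pyIdx? N p.2 = some c) ↔
            ((∃ p ∈ psB2, (i ≤ p.2 ∧ p.2 < n - j) ∧
              PySem.List.pyIdx? M p.1 = some r ∧ PySem.List.pyIdx? N p.2 = some c) ∨
             (∃ p ∈ psB1,
              PySem.List.pyIdx? M p.1 = some r ∧ PySem.List.pyIdx? N p.2 = some c)) := by
          constructor
          · rintro ⟨⟨row, col⟩, hpmem, hCA, hidx⟩
            have hrng := hmemA _ hpmem
            simp only at hrng
            by_cases hrk : row = k
            · subst hrk
              refine Or.inr ⟨(row, col), ?_, hidx⟩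
              rw [hpsB1]
              exact List.mem_flatMap.mpr ⟨col,
                PySem.List.mem_pyRange_one.mpr ⟨by omega, by omega⟩, by
                  exact List.mem_cons_self ..⟩
            · by_cases hrl : row = m - l - 1
              · refine Or.inr ⟨(row, col), ?_, hidx⟩
                rw [hpsB1]
                refine List.mem_flatMap.mpr ⟨col,
                  PySem.List.mem_pyRange_one.mpr ⟨by omega, by omega⟩, ?_⟩
                rw [hrl]
                exact List.mem_cons_of_mem _ (List.mem_cons_self ..)
              · have hdiag : row - k = col - i ∨ row - k = n - j - col - 1 := by
                  rcases hCA with h | h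
                  · exact absurd h (by tauto)
                  · exact h
                refine Or.inl ⟨(row, col), ?_, ⟨by omega, by omega⟩, hidx⟩
                rw [hpsB2]
                refine List.mem_flatMap.mpr ⟨row,
                  PySem.List.mem_pyRange_one.mpr ⟨by omega, by omega⟩, ?_⟩
                refine List.mem_map.mpr ⟨col, ?_, rfl⟩
                simp only [List.mem_cons, List.mem_singleton, List.not_mem_nil, or_false]
                omega
          · rintro (⟨⟨row, col⟩, hpmem, hC2, hidx⟩ | ⟨⟨row, col⟩, hpmem, hidx⟩)
            · have hrng := hmemB2 _ hpmem
              simp only at hrng hC2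
              refine ⟨(row, col), ?_, Or.inr (by omega), hidx⟩
              rw [hpsA]
              refine List.mem_flatMap.mpr ⟨row,
                PySem.List.mem_pyRange_one.mpr ⟨by omega, by omega⟩, ?_⟩
              exact List.mem_map.mpr ⟨col,
                PySem.List.mem_pyRange_one.mpr ⟨by omega, by omega⟩, rfl⟩
            · have hrng := hmemB1 _ hpmem
              simp only at hrng
              refine ⟨(row, col), ?_, Or.inl (by omega), hidx⟩
              rw [hpsA]
              refine List.mem_flatMap.mpr ⟨row,
                PySem.List.mem_pyRange_one.mpr ⟨by rcases hrng.1 with h | h <;> omega,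
                  by rcases hrng.1 with h | h <;> omega⟩, ?_⟩
              exact List.mem_map.mpr ⟨col,
                PySem.List.mem_pyRange_one.mpr ⟨by omega, by omega⟩, rfl⟩
        split_ifs with h1 h2 h3 <;>
          first
          | rfl
          | exact absurd (key.mp h1) (fun h => h.elim ‹_› ‹_›)
          | exact absurd (key.mpr (Or.inl ‹_›)) h1
          | exact absurd (key.mpr (Or.inr ‹_›)) h1)
      rw [hgrid]
      exact pvFmt _
    · -- empty column span: no write happens in either version
      have hcols : PySem.List.pyRange i (n - j) 1 = [] :=
        PySem.List.pyRange_one_eq_nil (by omega)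
      rw [hcols]
      simp only [List.foldl_nil]
      rw [pvFoldlId, if_neg (by tauto)]
      exact pvFmt _
  · -- empty row span: no write happens in either version
    have hrows : PySem.List.pyRange k (m - l) 1 = [] :=
      PySem.List.pyRange_one_eq_nil (by omega)
    rw [hrows]
    simp only [List.foldl_nil]
    rw [if_neg (by tauto)]
    exact pvFmt _
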